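-- pv_equiv track=rewrite | github.com/4shadoww/stabilizerbot | core/lib/pywikibot/textlib.py | expandmarker
-- ===== SOURCE A (Python) =====
-- def expandmarker(text, marker='', separator=''):
--     # set to remove any number of separator occurrences plus arbitrary
--     # whitespace before, after, and between them,
--     # by allowing to include them into marker.
--     if separator:
--         firstinmarker = text.find(marker)
--         firstinseparator = firstinmarker
--         lenseparator = len(separator)
--         striploopcontinue = True
--         while firstinseparator > 0 and striploopcontinue:
--             striploopcontinue = False
--             if (firstinseparator >= lenseparator) and \
--                (separator == text[firstinseparator -
--                                   lenseparator:firstinseparator]):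
--                 firstinseparator -= lenseparator
--                 striploopcontinue = True
--             elif text[firstinseparator - 1] < ' ':
--                 firstinseparator -= 1
--                 striploopcontinue = True
--         marker = text[firstinseparator:firstinmarker] + marker
--     return marker
-- ===== SOURCE B (Python) =====
-- import re
--
--
-- def expandmarker(text, marker='', separator=''):
--     # Expand the marker backwards over any run of separator occurrences and
--     # control characters, using one anchored regex search over the prefix
--     # instead of an explicit backward index loop.
--     if separator:
--         firstinmarker = text.find(marker)
--         if firstinmarker > 0:
--             prefix = text[:firstinmarker]
--             m = re.search('(?:' + re.escape(separator) + r'|[\x00-\x1f])*\Z',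
--                           prefix)
--             marker = prefix[m.start():] + marker
--     return marker
-- ===== Notes on version B (the rewrite author's own statement) =====
-- stated objective: idiomatic
-- what changed: A's explicit backward index-stripping while-loop (with a continue flag) is replaced by a single anchored regex search over the prefix before the marker: re.search('(?:sep|[\x00-\x1f])*\Z', prefix) finds the leftmost position from which the suffix tiles into separator blocks and control characters, and the proof shows this leftmost tileable start coincides with A's greedy right-to-left strip.
import Mathlib
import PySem

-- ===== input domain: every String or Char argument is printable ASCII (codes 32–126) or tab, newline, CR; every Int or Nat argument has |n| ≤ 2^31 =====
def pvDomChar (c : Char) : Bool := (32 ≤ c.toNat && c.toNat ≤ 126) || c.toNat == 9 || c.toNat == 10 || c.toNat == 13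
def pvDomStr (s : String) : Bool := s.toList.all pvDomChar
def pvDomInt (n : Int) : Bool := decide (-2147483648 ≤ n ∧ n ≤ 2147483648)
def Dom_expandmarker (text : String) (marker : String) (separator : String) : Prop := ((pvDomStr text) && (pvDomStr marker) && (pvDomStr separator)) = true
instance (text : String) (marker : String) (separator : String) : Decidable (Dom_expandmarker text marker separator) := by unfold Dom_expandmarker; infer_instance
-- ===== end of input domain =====

-- B replaces A's explicit backward index-stripping loop by a single anchored
-- regex search over the prefix before the marker (ported here as a leftmost
-- tileable-suffix search); equivalence of the return values is proved below.

-- ===== PORT A =====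

-- Python's `text[i-1] < ' '` compares 1-char strings, i.e. code points.
def pvCtrl (c : Char) : Bool := decide (c < ' ')

-- the `while firstinseparator > 0 and striploopcontinue` loop of A
def pvLoopA (t s : List Char) (hs : s ≠ []) (fis : Int) (cont : Bool) : Int :=
  if h : fis > 0 ∧ cont = true then
    if (s.length : Int) ≤ fis ∧ PySem.List.slice t (some (fis - s.length)) (some fis) = s then
      pvLoopA t s hs (fis - s.length) true
    else if ((PySem.List.pyGet? t (fis - 1)).any pvCtrl) = true then
      pvLoopA t s hs (fis - 1) true
    else
      pvLoopA t s hs fis false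
  else fis
termination_by fis.toNat * 2 + (if cont then 1 else 0)
decreasing_by
  · have hL : 0 < s.length := List.length_pos_iff.mpr hs
    simp only [if_pos]
    omega
  · simp only [if_pos]
    omega
  · have : cont = true := h.2
    simp [this]

def expandmarker (text : String) (marker : String) (separator : String) : String :=
  if hsep : separator = "" then marker
  else
    let firstinmarker : Int := PySem.Str.find text marker
    let firstinseparator : Int :=
      pvLoopA text.toList separator.toList (by simpa using hsep) firstinmarker true
    String.ofList (PySem.List.slice text.toList (some firstinseparator) (some firstinmarker)) ++ marker

-- ===== PORT B =====

-- Backtracking matcher for the regex `(?:sep|[\x00-\x1f])*\Z` anchored at the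
-- start of `cs` (exact for this pattern: the star tries a separator block,
-- then a control character, and matches the end of the string when empty).
def pvTile (s : List Char) (hs : s ≠ []) (cs : List Char) : Bool :=
  if hcs : cs = [] then true
  else
    (decide (cs.take s.length = s) && pvTile s hs (cs.drop s.length)) ||
    (pvCtrl (cs.head hcs) && pvTile s hs cs.tail)
termination_by cs.length
decreasing_by
  · have hL : 0 < s.length := List.length_pos_iff.mpr hs
    have : 0 < cs.length := List.length_pos_iff.mpr hcs
    simp only [List.length_drop]; omega
  · have : 0 < cs.length := List.length_pos_iff.mpr hcs
    simp only [List.length_tail]; omega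

theorem pvTile_nil (s : List Char) (hs : s ≠ []) : pvTile s hs [] = true := by
  rw [pvTile]; simp

-- `re.search` scans candidate start positions left to right: the result is
-- the leftmost suffix of `cs` matched by the anchored pattern.
def pvSearch (s : List Char) (hs : s ≠ []) (cs : List Char) : List Char :=
  if pvTile s hs cs = true then cs else pvSearch s hs cs.tail
termination_by cs.length
decreasing_by
  rename_i h
  have hcs : cs ≠ [] := fun he => h (he ▸ pvTile_nil s hs)
  have : 0 < cs.length := List.length_pos_iff.mpr hcs
  simp only [List.length_tail]; omega

def expandmarker_alt (text : String) (marker : String) (separator : String) : String :=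
  if hsep : separator = "" then marker
  else
    let firstinmarker : Int := PySem.Str.find text marker
    if firstinmarker > 0 then
      String.ofList (pvSearch separator.toList (by simpa using hsep)
        (PySem.List.slice text.toList none (some firstinmarker))) ++ marker
    else marker

-- ===== PRECONDITION & SPEC =====
def Spec_expandmarker (text : String) (marker : String) (separator : String) (out : String) : Prop := out = expandmarker_alt text marker separator
instance (text : String) (marker : String) (separator : String) (out : String) : Decidable (Spec_expandmarker text marker separator out) := by unfold Spec_expandmarker; infer_instance

-- ===== CLAIM (what is proved, stated in full; the proofs are below) =====
def Claim_equal_expandmarker : Prop := ∀ (text : String) (marker : String) (separator : String), Dom_expandmarker text marker separator → Spec_expandmarker text marker separator (expandmarker text marker separator)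

-- ===== LEMMAS AND PROOFS =====

-- proof-side greedy strip (A's loop, over the prefix list, Nat indices)
def pvG (s p : List Char) (hs : s ≠ []) (i : Nat) : Nat :=
  if s.length ≤ i ∧ 0 < i ∧ (p.drop (i - s.length)).take s.length = s then
    pvG s p hs (i - s.length)
  else if 0 < i ∧ pvCtrl (p.getD (i-1) ' ') = true then
    pvG s p hs (i-1)
  else i
termination_by i
decreasing_by
  · have hL : 0 < s.length := List.length_pos_iff.mpr hs
    omega
  · omega

-- "[j, i) of p is tileable by separator blocks / control chars", right-anchored
inductive PvTilR (s p : List Char) : Nat → Nat → Prop where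
  | refl (j : Nat) : PvTilR s p j j
  | sep (j i : Nat) (h1 : s.length ≤ i) (h2 : i ≤ p.length)
      (hocc : (p.drop (i - s.length)).take s.length = s)
      (ht : PvTilR s p j (i - s.length)) : PvTilR s p j i
  | ctl (j i : Nat) (h1 : 0 < i) (h2 : i ≤ p.length)
      (hc : pvCtrl (p.getD (i-1) ' ') = true)
      (ht : PvTilR s p j (i-1)) : PvTilR s p j i

-- same, left-anchored
inductive PvTilL (s p : List Char) : Nat → Nat → Prop where
  | refl (j : Nat) : PvTilL s p j j
  | sep (j e : Nat) (hocc : (p.drop j).take s.length = s)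
      (ht : PvTilL s p (j + s.length) e) : PvTilL s p j e
  | ctl (j e : Nat) (h1 : j < p.length) (hc : pvCtrl (p.getD j ' ') = true)
      (ht : PvTilL s p (j+1) e) : PvTilL s p j e

theorem pvOccLen {s p : List Char} {j : Nat} (hs : s ≠ [])
    (hocc : (p.drop j).take s.length = s) : j + s.length ≤ p.length := by
  have hL : 0 < s.length := List.length_pos_iff.mpr hs
  have := congrArg List.length hocc
  simp [Nat.min_def] at this
  omega

theorem pvOccChar {s p : List Char} {a k : Nat}
    (hocc : (p.drop a).take s.length = s) (hk : k < s.length) :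
    p.getD (a + k) ' ' = s.getD k ' ' := by
  have h1 : s[k]? = ((p.drop a).take s.length)[k]? := by rw [hocc]
  rw [List.getElem?_take, if_pos hk, List.getElem?_drop] at h1
  simp [List.getD, h1]

theorem pvG_le (s p : List Char) (hs : s ≠ []) (i : Nat) : pvG s p hs i ≤ i := by
  fun_induction pvG with
  | case1 i h ih => omega
  | case2 i h1 h2 ih => omega
  | case3 i h1 h2 => omega

theorem pvG_tilR (s p : List Char) (hs : s ≠ []) (i : Nat) (hi : i ≤ p.length) :
    PvTilR s p (pvG s p hs i) i := by
  fun_induction pvG with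
  | case1 i h ih => exact PvTilR.sep _ _ h.1 hi h.2.2 (ih (by omega))
  | case2 i h1 h2 ih => exact PvTilR.ctl _ _ h2.1 hi h2.2 (ih (by omega))
  | case3 i h1 h2 => exact PvTilR.refl i

-- greedy strips through a region of control characters
theorem pvG_le_of_ctrl (s p : List Char) (hs : s ≠ []) :
    ∀ x k, k ≤ x → (∀ m, k ≤ m → m < x → pvCtrl (p.getD m ' ') = true) →
    pvG s p hs x ≤ k := by
  intro x
  induction x using Nat.strong_induction_on with
  | _ x ih =>
    intro k hk hreg
    by_cases hxk : x ≤ k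
    · exact le_trans (pvG_le s p hs x) hxk
    · have hL : 0 < s.length := List.length_pos_iff.mpr hs
      rw [pvG]
      split_ifs with c1 c2
      · by_cases hxL : x - s.length ≤ k
        · exact le_trans (pvG_le s p hs _) hxL
        · exact ih _ (by omega) k (by omega) (fun m hm1 hm2 => hreg m hm1 (by omega))
      · exact ih _ (by omega) k (by omega) (fun m hm1 hm2 => hreg m hm1 (by omega))
      · exact absurd ⟨by omega, hreg (x-1) (by omega) (by omega)⟩ c2

-- a tiling extends to the right through control characters
theorem pvTilR_extend {s p : List Char} {j k : Nat} (h : PvTilR s p j k) :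
    ∀ x, k ≤ x → x ≤ p.length →
    (∀ m, k ≤ m → m < x → pvCtrl (p.getD m ' ') = true) → PvTilR s p j x := by
  intro x hkx hxp hreg
  induction hd : x - k generalizing x with
  | zero => have : x = k := by omega
            exact this ▸ h
  | succ n ih =>
    have hx1 : 0 < x := by omega
    exact PvTilR.ctl _ _ hx1 hxp (hreg (x-1) (by omega) (by omega))
      (ih (x-1) (by omega) (by omega) (fun m hm1 hm2 => hreg m hm1 (by omega)) (by omega))

-- two overlapping occurrences of s whose overhang is all control characters
-- force every character of s to be a control character
theorem pvSepAllCtrl {s p : List Char} {k i : Nat} (hs : s ≠ [])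
    (hocc_i : (p.drop (i - s.length)).take s.length = s)
    (hocc_k : (p.drop (k - s.length)).take s.length = s)
    (hLk : s.length ≤ k) (hki : k < i) (hover : i - s.length < k)
    (hreg : ∀ m, k ≤ m → m < i → pvCtrl (p.getD m ' ') = true) :
    ∀ a, a < s.length → pvCtrl (s.getD a ' ') = true := by
  have hL : 0 < s.length := List.length_pos_iff.mpr hs
  have hLi : s.length ≤ i := by omega
  have hper : ∀ a, a + (i - k) < s.length → s.getD a ' ' = s.getD (a + (i - k)) ' ' := by
    intro a ha
    have e1 := pvOccChar hocc_i (show a < s.length by omega)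
    have e2 := pvOccChar hocc_k ha
    rw [show (k - s.length) + (a + (i - k)) = (i - s.length) + a by omega] at e2
    rw [← e1, ← e2]
  have htop : ∀ a, s.length - (i - k) ≤ a → a < s.length → pvCtrl (s.getD a ' ') = true := by
    intro a ha1 ha2
    rw [← pvOccChar hocc_i ha2]
    exact hreg _ (by omega) (by omega)
  have key : ∀ d a, s.length - a = d → a < s.length → pvCtrl (s.getD a ' ') = true := by
    intro d
    induction d using Nat.strong_induction_on with
    | _ d ih =>
      intro a hd ha
      by_cases hc : s.length - (i - k) ≤ a
      · exact htop a hc ha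
      · rw [hper a (by omega)]
        exact ih (s.length - (a + (i - k))) (by omega) _ rfl (by omega)
  exact fun a ha => key _ a rfl ha

-- minimality: the greedy strip reaches every tileable start position
theorem pvG_min (s p : List Char) (hs : s ≠ []) :
    ∀ i, i ≤ p.length → ∀ j, PvTilR s p j i → pvG s p hs i ≤ j := by
  have hL : 0 < s.length := List.length_pos_iff.mpr hs
  intro i
  induction i using Nat.strong_induction_on with
  | _ i ihM =>
    intro hip j hder
    cases hder with
    | refl => exact pvG_le s p hs i
    | sep _ h1 h2 hocc ht =>
        rw [pvG, if_pos ⟨h1, by omega, hocc⟩]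
        exact ihM (i - s.length) (by omega) (by omega) j ht
    | ctl _ h1 h2 hc ht =>
        rw [pvG]
        split_ifs with c1 c2
        · -- greedy strips a separator while the tiling ends in a control char
          have hN : ∀ k, PvTilR s p j k → k < i →
              (∀ m, k ≤ m → m < i → pvCtrl (p.getD m ' ') = true) →
              pvG s p hs (i - s.length) ≤ j := by
            intro k hk
            induction hk with
            | refl =>
                intro hji hregj
                by_cases hij : i - s.length ≤ j
                · exact le_trans (pvG_le s p hs _) hij
                · exact pvG_le_of_ctrl s p hs (i - s.length) j (by omega)
                    (fun m hm1 hm2 => hregj m hm1 (by omega))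
            | sep k' h1k h2k hocck ht' ih' =>
                intro hki hreg
                by_cases hcase : k' ≤ i - s.length
                · have htk : PvTilR s p j k' := PvTilR.sep _ _ h1k h2k hocck ht'
                  have hext : PvTilR s p j (i - s.length) :=
                    pvTilR_extend htk _ hcase (by omega)
                      (fun m hm1 hm2 => hreg m hm1 (by omega))
                  exact ihM (i - s.length) (by omega) (by omega) j hext
                · have hallc := pvSepAllCtrl hs c1.2.2 hocck h1k hki (by omega)
                    (fun m hm1 hm2 => hreg m hm1 hm2)
                  have hreg2 : ∀ m, k' - s.length ≤ m → m < i →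
                      pvCtrl (p.getD m ' ') = true := by
                    intro m hm1 hm2
                    by_cases hmk : k' ≤ m
                    · exact hreg m hmk hm2
                    · have ha : m - (k' - s.length) < s.length := by omega
                      have hch := pvOccChar hocck ha
                      rw [show (k' - s.length) + (m - (k' - s.length)) = m by omega] at hch
                      rw [hch]
                      exact hallc _ ha
                  have hext : PvTilR s p j (i - s.length) :=
                    pvTilR_extend ht' _ (by omega) (by omega)
                      (fun m hm1 hm2 => hreg2 m hm1 (by omega))
                  exact ihM (i - s.length) (by omega) (by omega) j hext
            | ctl k' h1k h2k hck ht' ih' =>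
                intro hki hreg
                refine ih' (by omega) (fun m hm1 hm2 => ?_)
                by_cases hm : k' ≤ m
                · exact hreg m hm hm2
                · have hmk : m = k' - 1 := by omega
                  exact hmk ▸ hck
          refine hN (i-1) ht (by omega) (fun m hm1 hm2 => ?_)
          have hmk : m = i - 1 := by omega
          exact hmk ▸ hc
        · exact ihM (i-1) (by omega) (by omega) j ht
        · exact absurd ⟨h1, hc⟩ c2


theorem pvTilR_prepend_sep {s p : List Char} (hs : s ≠ []) {j : Nat}
    (hocc : (p.drop j).take s.length = s) :
    ∀ {a e : Nat}, PvTilR s p a e → a = j + s.length → PvTilR s p j e := by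
  intro a e h
  induction h with
  | refl => intro ha; subst ha
            exact PvTilR.sep j (j + s.length) (by omega) (pvOccLen hs hocc)
              (by simpa using hocc) (by simpa using PvTilR.refl j)
  | sep _ h1 h2 hocc' ht ih =>
      intro ha
      exact PvTilR.sep _ _ h1 h2 hocc' (ih ha)
  | ctl _ h1 h2 hc ht ih =>
      intro ha
      exact PvTilR.ctl _ _ h1 h2 hc (ih ha)

theorem pvTilR_prepend_ctl {s p : List Char} {j : Nat}
    (h1 : j < p.length) (hc : pvCtrl (p.getD j ' ') = true) :
    ∀ {a e : Nat}, PvTilR s p a e → a = j + 1 → PvTilR s p j e := by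
  intro a e h
  induction h with
  | refl => intro ha; subst ha
            exact PvTilR.ctl j (j + 1) (by omega) (by omega)
              (by simpa using hc) (by simpa using PvTilR.refl j)
  | sep _ h1' h2' hocc' ht ih =>
      intro ha
      exact PvTilR.sep _ _ h1' h2' hocc' (ih ha)
  | ctl _ h1' h2' hc' ht ih =>
      intro ha
      exact PvTilR.ctl _ _ h1' h2' hc' (ih ha)

theorem pvTilL_snoc_sep {s p : List Char} {j i : Nat}
    (h1 : s.length ≤ i) (hocc : (p.drop (i - s.length)).take s.length = s) :
    ∀ {b : Nat}, PvTilL s p j b → b = i - s.length → PvTilL s p j i := by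
  intro b h
  induction h with
  | refl => intro hb; subst hb
            refine PvTilL.sep _ _ hocc ?_
            rw [show i - s.length + s.length = i by omega]
            exact PvTilL.refl i
  | sep _ _ hocc' ht ih =>
      intro hb
      exact PvTilL.sep _ _ hocc' (ih hb)
  | ctl _ _ h1' hc' ht ih =>
      intro hb
      exact PvTilL.ctl _ _ h1' hc' (ih hb)

theorem pvTilL_snoc_ctl {s p : List Char} {j i : Nat}
    (h1 : 0 < i) (h2 : i ≤ p.length) (hc : pvCtrl (p.getD (i-1) ' ') = true) :
    ∀ {b : Nat}, PvTilL s p j b → b = i - 1 → PvTilL s p j i := by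
  intro b h
  induction h with
  | refl => intro hb; subst hb
            refine PvTilL.ctl _ _ (by omega) hc ?_
            rw [show i - 1 + 1 = i by omega]
            exact PvTilL.refl i
  | sep _ _ hocc' ht ih =>
      intro hb
      exact PvTilL.sep _ _ hocc' (ih hb)
  | ctl _ _ h1' hc' ht ih =>
      intro hb
      exact PvTilL.ctl _ _ h1' hc' (ih hb)

theorem pvTilL_tile (s p : List Char) (hs : s ≠ []) :
    ∀ {j e : Nat}, PvTilL s p j e → e = p.length → pvTile s hs (p.drop j) = true := by
  have hL : 0 < s.length := List.length_pos_iff.mpr hs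
  intro j e h
  induction h with
  | refl =>
      intro he; subst he
      rw [List.drop_eq_nil_of_le (by omega)]
      exact pvTile_nil s hs
  | sep _ _ hocc ht ih =>
      rename_i j' _
      intro he; subst he
      have hjL := pvOccLen hs hocc
      rw [pvTile]
      have hnil : p.drop j' ≠ [] := by
        intro hn
        have := List.drop_eq_nil_iff.mp hn
        omega
      rw [dif_neg hnil]
      refine Bool.or_eq_true_iff.mpr (Or.inl (Bool.and_eq_true_iff.mpr ⟨decide_eq_true hocc, ?_⟩))
      rw [List.drop_drop]
      exact ih rfl
  | ctl _ _ h1 hc ht ih =>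
      rename_i j' _
      intro he; subst he
      rw [pvTile]
      have hnil : p.drop j' ≠ [] := by
        intro hn
        have := List.drop_eq_nil_iff.mp hn
        omega
      rw [dif_neg hnil]
      refine Bool.or_eq_true_iff.mpr (Or.inr (Bool.and_eq_true_iff.mpr ⟨?_, ?_⟩))
      · rw [List.head_eq_getElem, List.getElem_drop]
        rw [List.getD_eq_getElem _ _ (by omega)] at hc
        simpa using hc
      · rw [← List.drop_one, List.drop_drop]
        exact ih rfl

theorem pvTile_iff_tilL (s p : List Char) (hs : s ≠ []) :
    ∀ j, j ≤ p.length → (pvTile s hs (p.drop j) = true ↔ PvTilL s p j p.length) := by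
  have hL : 0 < s.length := List.length_pos_iff.mpr hs
  intro j
  induction hd : p.length - j using Nat.strong_induction_on generalizing j with
  | _ d ih =>
    intro hj
    constructor
    · intro htile
      rw [pvTile] at htile
      by_cases hnil : p.drop j = []
      · have : j = p.length := by
          have := List.drop_eq_nil_iff.mp hnil
          omega
        exact this ▸ PvTilL.refl _
      · rw [dif_neg hnil] at htile
        have hjlt : j < p.length := by
          by_contra hge
          exact hnil (List.drop_eq_nil_iff.mpr (by omega))
        rcases Bool.or_eq_true_iff.mp htile with h | h
        · rcases Bool.and_eq_true_iff.mp h with ⟨h1, h2⟩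
          have hocc : (p.drop j).take s.length = s := of_decide_eq_true h1
          have hjL := pvOccLen hs hocc
          rw [List.drop_drop] at h2
          have := (ih (p.length - (j + s.length)) (by omega) (j + s.length) rfl (by omega)).mp h2
          exact PvTilL.sep _ _ hocc this
        · rcases Bool.and_eq_true_iff.mp h with ⟨h1, h2⟩
          have hhead : (p.drop j).head hnil = p.getD j ' ' := by
            rw [List.head_eq_getElem, List.getElem_drop, List.getD_eq_getElem _ _ (by omega)]
            simp
          rw [hhead] at h1
          rw [← List.drop_one, List.drop_drop] at h2
          have := (ih (p.length - (j + 1)) (by omega) (j + 1) rfl (by omega)).mp h2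
          exact PvTilL.ctl _ _ hjlt h1 this
    · intro htl
      exact pvTilL_tile s p hs htl rfl

theorem pvTilL_iff_tilR (s p : List Char) (hs : s ≠ []) {j e : Nat} :
    PvTilL s p j e ↔ PvTilR s p j e := by
  constructor
  · intro h
    induction h with
    | refl => exact PvTilR.refl _
    | sep _ _ hocc ht ih => exact pvTilR_prepend_sep hs hocc ih rfl
    | ctl _ _ h1 hc ht ih => exact pvTilR_prepend_ctl h1 hc ih rfl
  · intro h
    induction h with
    | refl => exact PvTilL.refl _
    | sep _ h1 h2 hocc ht ih => exact pvTilL_snoc_sep h1 hocc ih rfl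
    | ctl _ h1 h2 hc ht ih => exact pvTilL_snoc_ctl h1 h2 hc ih rfl

theorem pvSearch_eq (s : List Char) (hs : s ≠ []) :
    ∀ j q, j ≤ List.length q → (∀ j' < j, pvTile s hs (q.drop j') = false) →
    pvTile s hs (q.drop j) = true → pvSearch s hs q = q.drop j := by
  intro j
  induction j with
  | zero =>
      intro q hj hmin htile
      rw [pvSearch]
      simp only [List.drop_zero] at htile
      rw [if_pos htile]
      simp
  | succ j ih =>
      intro q hj hmin htile
      have h0 : pvTile s hs q = false := by simpa using hmin 0 (by omega)
      rw [pvSearch, if_neg (by simp [h0])]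
      have htail : ∀ (k : Nat), q.tail.drop k = q.drop (k+1) := by
        intro k
        rw [← List.drop_one, List.drop_drop, Nat.add_comm]
      have := ih q.tail (by simp [List.length_tail]; omega)
        (fun j' hj' => by rw [htail j']; exact hmin (j'+1) (by omega))
        (by rw [htail j]; exact htile)
      rw [this, htail j]

-- B's search returns exactly the suffix A's greedy loop keeps
theorem pvSearch_eq_drop_pvG (s p : List Char) (hs : s ≠ []) :
    pvSearch s hs p = p.drop (pvG s p hs p.length) := by
  have hgle : pvG s p hs p.length ≤ p.length := pvG_le s p hs _
  have htr : PvTilR s p (pvG s p hs p.length) p.length := pvG_tilR s p hs _ le_rfl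
  have htile : pvTile s hs (p.drop (pvG s p hs p.length)) = true :=
    (pvTile_iff_tilL s p hs _ hgle).mpr ((pvTilL_iff_tilR s p hs).mpr htr)
  refine pvSearch_eq s hs _ p hgle (fun j' hj' => ?_) htile
  by_contra hne
  have ht' : pvTile s hs (p.drop j') = true := by
    cases h : pvTile s hs (p.drop j') with
    | true => rfl
    | false => exact absurd h hne
  have := (pvTilL_iff_tilR s p hs).mp ((pvTile_iff_tilL s p hs j' (by omega)).mp ht')
  have := pvG_min s p hs p.length le_rfl j' this
  omega

theorem pvLoopA_false (t s : List Char) (hs : s ≠ []) (fis : Int) :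
    pvLoopA t s hs fis false = fis := by
  rw [pvLoopA]; simp

-- bridge: A's Int loop over `text` equals the greedy strip over the prefix
theorem pvLoopA_eq_pvG (t s : List Char) (hs : s ≠ []) (f : Nat) (hf : f ≤ t.length) :
    ∀ n : Nat, n ≤ f → pvLoopA t s hs (n : Int) true = ((pvG s (t.take f) hs n : Nat) : Int) := by
  have hL : 0 < s.length := List.length_pos_iff.mpr hs
  intro n
  induction n using Nat.strong_induction_on with
  | _ n ih =>
    intro hnf
    rw [pvLoopA, pvG]
    by_cases hn : 0 < n
    · rw [dif_pos ⟨by exact_mod_cast hn, rfl⟩]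
      have hslice : s.length ≤ n →
          (PySem.List.slice t (some ((n:Int) - (s.length:Int))) (some (n:Int)) =
            (t.drop (n - s.length)).take s.length) := by
        intro hLn
        rw [show (n:Int) - (s.length:Int) = ((n - s.length : Nat) : Int) by omega]
        rw [PySem.List.slice_natCast]
        congr 1
        omega
      have hpre : s.length ≤ n →
          ((t.take f).drop (n - s.length)).take s.length = (t.drop (n - s.length)).take s.length := by
        intro hLn
        rw [List.drop_take, List.take_take]
        congr 1
        omega
      have hcond1 : ((s.length : Int) ≤ (n:Int) ∧
            PySem.List.slice t (some ((n:Int) - (s.length:Int))) (some (n:Int)) = s) ↔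
          (s.length ≤ n ∧ 0 < n ∧ ((t.take f).drop (n - s.length)).take s.length = s) := by
        constructor
        · rintro ⟨h1, h2⟩
          have hLn : s.length ≤ n := by exact_mod_cast h1
          exact ⟨hLn, hn, by rw [hpre hLn, ← hslice hLn]; exact h2⟩
        · rintro ⟨h1, _, h3⟩
          exact ⟨by exact_mod_cast h1, by rw [hslice h1, ← hpre h1]; exact h3⟩
      have hcond2 : ((PySem.List.pyGet? t ((n:Int) - 1)).any pvCtrl = true) ↔
          (0 < n ∧ pvCtrl ((t.take f).getD (n-1) ' ') = true) := by
        have hget : PySem.List.pyGet? t ((n:Int) - 1) = some (t.getD (n-1) ' ') := by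
          rw [show (n:Int) - 1 = ((n - 1 : Nat) : Int) by omega, PySem.List.pyGet?_natCast,
            List.getElem?_eq_getElem (show n - 1 < t.length by omega),
            List.getD_eq_getElem _ _ (by omega)]
        have hgd : (t.take f).getD (n-1) ' ' = t.getD (n-1) ' ' := by
          rw [List.getD_eq_getElem?_getD, List.getD_eq_getElem?_getD, List.getElem?_take,
            if_pos (by omega)]
        rw [hget, hgd]
        simp [hn]
      by_cases c1 : s.length ≤ n ∧ 0 < n ∧ ((t.take f).drop (n - s.length)).take s.length = s
      · rw [if_pos (hcond1.mpr c1), if_pos c1]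
        rw [show (n:Int) - (s.length:Int) = ((n - s.length : Nat) : Int) by omega]
        exact ih (n - s.length) (by omega) (by omega)
      · rw [if_neg (fun h => c1 (hcond1.mp h)), if_neg c1]
        by_cases c2 : 0 < n ∧ pvCtrl ((t.take f).getD (n-1) ' ') = true
        · rw [if_pos (hcond2.mpr c2), if_pos c2]
          rw [show (n:Int) - 1 = ((n - 1 : Nat) : Int) by omega]
          exact ih (n - 1) (by omega) (by omega)
        · rw [if_neg (fun h => c2 (hcond2.mp h)), if_neg c2]
          exact pvLoopA_false t s hs _
    · have hn0 : n = 0 := by omega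
      subst hn0
      norm_num

-- ===== VERDICT (by name: the statement is the Claim_ definition above) =====
theorem expandmarker_spec : Claim_equal_expandmarker := by
  unfold Claim_equal_expandmarker
  intro text marker separator _hdom
  unfold Spec_expandmarker expandmarker expandmarker_alt
  by_cases hsep : separator = ""
  · rw [dif_pos hsep, dif_pos hsep]
  · rw [dif_neg hsep, dif_neg hsep]
    simp only []
    have hsL : separator.toList ≠ [] := by simpa using hsep
    have hfim_le : PySem.Str.find text marker ≤ text.toList.length := by
      simp only [PySem.Str.find_eq]
      simpa using PySem.Chars.find_le_length text.toList marker.toList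
    by_cases hpos : PySem.Str.find text marker > 0
    · rw [if_pos hpos]
      set fim := PySem.Str.find text marker with hfim
      have hf0 : 0 < fim.toNat := by omega
      have hcast : fim = ((fim.toNat : Nat) : Int) := by omega
      set f := fim.toNat with hfdef
      have hff : f ≤ text.toList.length := by omega
      set p := text.toList.take f with hp
      have hplen : p.length = f := by
        rw [hp, List.length_take]
        omega
      have hloop : pvLoopA text.toList separator.toList (by simpa using hsep) fim true =
          ((pvG separator.toList p (by simpa using hsep) f : Nat) : Int) := by
        rw [hcast]
        exact pvLoopA_eq_pvG text.toList separator.toList _ f hff f le_rfl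
      rw [hloop]
      set g := pvG separator.toList p (by simpa using hsep) f with hg
      have hgle : g ≤ f := pvG_le _ _ _ f
      have hsliceA : PySem.List.slice text.toList (some ((g : Nat) : Int)) (some fim) =
          (text.toList.drop g).take (f - g) := by
        rw [hcast, PySem.List.slice_natCast]
      have hsliceB : PySem.List.slice text.toList none (some fim) = p := by
        rw [hcast, PySem.List.slice_to_natCast]
      have hsearch : pvSearch separator.toList (by simpa using hsep) p = p.drop g := by
        have := pvSearch_eq_drop_pvG separator.toList p (by simpa using hsep)
        rw [hplen] at this
        exact this
      rw [hsliceA, hsliceB, hsearch]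
      congr 1
      congr 1
      rw [hp, List.drop_take]
    · rw [if_neg hpos]
      have hloop : pvLoopA text.toList separator.toList (by simpa using hsep)
          (PySem.Str.find text marker) true = PySem.Str.find text marker := by
        rw [pvLoopA, dif_neg]
        intro h
        exact hpos h.1
      rw [hloop]
      have hnil : PySem.List.slice text.toList (some (PySem.Str.find text marker))
          (some (PySem.Str.find text marker)) = [] := by
        apply List.eq_nil_of_length_eq_zero
        rw [PySem.List.length_slice]
        omega
      rw [hnil]
      simp
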